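-- pv_equiv track=rewrite | github.com/sheed17/neyma-platform | pipeline/revenue_brief_renderer.py | _normalize_to_canonical_services
-- ===== SOURCE A (Python) =====
-- from typing import Dict, Any, List, Optional, Tuple
--
-- CANONICAL_SERVICE_BUCKETS: Dict[str, List[str]] = {
--     "implants": ["implant", "dental implant", "implants", "dental implants", "all-on-4", "all on 4"],
--     "orthodontics": ["orthodontic", "orthodontics", "invisalign", "braces", "clear aligner", "clear aligners"],
--     "veneers": ["veneer", "veneers", "porcelain veneer", "porcelain veneers"],
--     "emergency": ["emergency", "emergency dental", "emergency dentist", "same day", "same-day", "urgent dental"],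
--     "cosmetic": ["cosmetic", "cosmetic dentistry", "smile makeover", "teeth whitening", "whitening"],
--     "sedation": ["sedation", "sedation dentistry", "iv sedation", "nitrous", "nitrous oxide", "oral sedation", "sleep dentistry"],
--     "crowns": ["crown", "crowns", "same day crown", "same-day crown", "dental crown", "dental crowns"],
--     "sleep apnea": ["sleep apnea", "sleep-apnea", "snoring"],
-- }
--
-- def _normalize_to_canonical_services(
--     high_ticket: List[str], missing: List[str]
-- ) -> Tuple[List[str], List[str]]:
--     """
--     Map raw procedure/page names to canonical buckets. Returns (detected_canonical, missing_canonical)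
--     in priority order: Implants, Orthodontics, Veneers, Emergency, Cosmetic.
--     """
--     def match_bucket(raw: str) -> Optional[str]:
--         r = (raw or "").strip().lower()
--         for canonical_key, aliases in CANONICAL_SERVICE_BUCKETS.items():
--             if r in aliases or any(r == a for a in aliases):
--                 return canonical_key
--         return None
--
--     detected_set = set()
--     for item in high_ticket or []:
--         if not isinstance(item, str):
--             continue
--         b = match_bucket(item)
--         if b:
--             detected_set.add(b)
--
--     missing_set = set()
--     for item in missing or []:
--         if not isinstance(item, str):
--             continue
--         b = match_bucket(item)
--         if b:
--             missing_set.add(b)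
--
--     order_keys = ["implants", "orthodontics", "veneers", "emergency", "cosmetic", "sedation", "crowns", "sleep apnea"]
--     display_map = {
--         "implants": "Implants", "orthodontics": "Orthodontics", "veneers": "Veneers",
--         "emergency": "Emergency", "cosmetic": "Cosmetic", "sedation": "Sedation",
--         "crowns": "Crowns", "sleep apnea": "Sleep Apnea",
--     }
--     detected_list = [display_map[k] for k in order_keys if k in detected_set]
--     missing_list = [display_map[k] for k in order_keys if k in missing_set]
--     return (detected_list, missing_list)
-- ===== SOURCE B (Python) =====
-- from typing import List, Tuple
--
-- # Bucket-driven rendering table in priority order: (display name, aliases).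
-- # Instead of classifying each raw item into a bucket key and then ordering the
-- # keys, we normalize the inputs once into a set and walk the buckets in display
-- # order, emitting a bucket iff its alias set intersects the normalized input.
-- _RENDER_TABLE: List[Tuple[str, List[str]]] = [
--     ("Implants", ["implant", "dental implant", "implants", "dental implants", "all-on-4", "all on 4"]),
--     ("Orthodontics", ["orthodontic", "orthodontics", "invisalign", "braces", "clear aligner", "clear aligners"]),
--     ("Veneers", ["veneer", "veneers", "porcelain veneer", "porcelain veneers"]),
--     ("Emergency", ["emergency", "emergency dental", "emergency dentist", "same day", "same-day", "urgent dental"]),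
--     ("Cosmetic", ["cosmetic", "cosmetic dentistry", "smile makeover", "teeth whitening", "whitening"]),
--     ("Sedation", ["sedation", "sedation dentistry", "iv sedation", "nitrous", "nitrous oxide", "oral sedation", "sleep dentistry"]),
--     ("Crowns", ["crown", "crowns", "same day crown", "same-day crown", "dental crown", "dental crowns"]),
--     ("Sleep Apnea", ["sleep apnea", "sleep-apnea", "snoring"]),
-- ]
--
--
-- def _normalized(items) -> set:
--     return {s.strip().lower() for s in (items or []) if isinstance(s, str)}
--
--
-- def _normalize_to_canonical_services(high_ticket, missing):
--     ht = _normalized(high_ticket)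
--     ms = _normalized(missing)
--     detected_list = [d for d, aliases in _RENDER_TABLE if not ht.isdisjoint(aliases)]
--     missing_list = [d for d, aliases in _RENDER_TABLE if not ms.isdisjoint(aliases)]
--     return (detected_list, missing_list)
-- ===== Notes on version B (the rewrite author's own statement) =====
-- stated objective: faster
-- what changed: Inverted the loop nesting: instead of classifying each raw item by scanning all buckets and then ordering the matched keys, B normalizes the inputs once into a set and walks a priority-ordered (display, aliases) render table, emitting each bucket iff its alias list intersects the normalized set; the per-item bucket scan, match_bucket helper, key set and display_map lookup all disappear.
import Mathlib
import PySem

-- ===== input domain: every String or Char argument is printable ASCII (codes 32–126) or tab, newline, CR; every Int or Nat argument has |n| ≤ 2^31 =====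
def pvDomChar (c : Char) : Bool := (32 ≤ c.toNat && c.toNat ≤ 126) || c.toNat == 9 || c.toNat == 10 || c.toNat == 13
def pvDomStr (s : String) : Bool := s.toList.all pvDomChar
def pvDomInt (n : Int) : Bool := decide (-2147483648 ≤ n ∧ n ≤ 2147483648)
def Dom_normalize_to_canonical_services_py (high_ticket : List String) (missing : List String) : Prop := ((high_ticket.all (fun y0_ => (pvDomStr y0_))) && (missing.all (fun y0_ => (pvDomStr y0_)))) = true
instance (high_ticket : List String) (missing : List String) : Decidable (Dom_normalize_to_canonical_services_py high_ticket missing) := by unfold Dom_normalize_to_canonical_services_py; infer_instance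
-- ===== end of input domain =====

-- B inverts the loop nesting: it normalizes the inputs once into a set and walks a priority-ordered
-- (display, aliases) table, emitting a bucket iff its alias list meets the set; return value proved equal.

-- ===== PORT A =====
-- module constant CANONICAL_SERVICE_BUCKETS, in insertion order
def pvCanonicalBuckets : List (String × List String) :=
  [("implants", ["implant", "dental implant", "implants", "dental implants", "all-on-4", "all on 4"]),
   ("orthodontics", ["orthodontic", "orthodontics", "invisalign", "braces", "clear aligner", "clear aligners"]),
   ("veneers", ["veneer", "veneers", "porcelain veneer", "porcelain veneers"]),
   ("emergency", ["emergency", "emergency dental", "emergency dentist", "same day", "same-day", "urgent dental"]),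
   ("cosmetic", ["cosmetic", "cosmetic dentistry", "smile makeover", "teeth whitening", "whitening"]),
   ("sedation", ["sedation", "sedation dentistry", "iv sedation", "nitrous", "nitrous oxide", "oral sedation", "sleep dentistry"]),
   ("crowns", ["crown", "crowns", "same day crown", "same-day crown", "dental crown", "dental crowns"]),
   ("sleep apnea", ["sleep apnea", "sleep-apnea", "snoring"])]

def pvOrderKeys : List String :=
  ["implants", "orthodontics", "veneers", "emergency", "cosmetic", "sedation", "crowns", "sleep apnea"]

def pvDisplayMap : PySem.Dict String String :=
  PySem.Dict.ofList
    [("implants", "Implants"), ("orthodontics", "Orthodontics"), ("veneers", "Veneers"),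
     ("emergency", "Emergency"), ("cosmetic", "Cosmetic"), ("sedation", "Sedation"),
     ("crowns", "Crowns"), ("sleep apnea", "Sleep Apnea")]

-- A's inner for-loop over the bucket dict: `if r in aliases or any(r == a for a in aliases): return canonical_key`
def pvMatchLoopA (r : String) : List (String × List String) → Option String
  | [] => none
  | (k, aliases) :: rest =>
      if aliases.contains r || aliases.any (fun a => r == a) then some k else pvMatchLoopA r rest

def pvMatchBucketA (raw : String) : Option String :=
  -- r = (raw or "").strip().lower()
  let r := PySem.Str.lower (PySem.Str.strip (if raw == "" then "" else raw))
  pvMatchLoopA r pvCanonicalBuckets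

-- the set-accumulating loop (isinstance(item, str) is always true for List String)
def pvCollectA (items : List String) : PySem.Set String :=
  items.foldl
    (fun s item =>
      (pvMatchBucketA item).elim s (fun b => if b == "" then s else PySem.Set.add s b))  -- `if b:` add
    PySem.Set.empty

def normalize_to_canonical_services_py (high_ticket : List String) (missing : List String) : List String × List String :=
  let detected_set := pvCollectA high_ticket
  let missing_set := pvCollectA missing
  (pvOrderKeys.filterMap (fun k => if PySem.Set.contains detected_set k then pvDisplayMap.get? k else none),
   pvOrderKeys.filterMap (fun k => if PySem.Set.contains missing_set k then pvDisplayMap.get? k else none))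

-- ===== PORT B =====
-- _RENDER_TABLE: priority-ordered (display name, aliases)
def pvRenderTable : List (String × List String) :=
  [("Implants", ["implant", "dental implant", "implants", "dental implants", "all-on-4", "all on 4"]),
   ("Orthodontics", ["orthodontic", "orthodontics", "invisalign", "braces", "clear aligner", "clear aligners"]),
   ("Veneers", ["veneer", "veneers", "porcelain veneer", "porcelain veneers"]),
   ("Emergency", ["emergency", "emergency dental", "emergency dentist", "same day", "same-day", "urgent dental"]),
   ("Cosmetic", ["cosmetic", "cosmetic dentistry", "smile makeover", "teeth whitening", "whitening"]),
   ("Sedation", ["sedation", "sedation dentistry", "iv sedation", "nitrous", "nitrous oxide", "oral sedation", "sleep dentistry"]),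
   ("Crowns", ["crown", "crowns", "same day crown", "same-day crown", "dental crown", "dental crowns"]),
   ("Sleep Apnea", ["sleep apnea", "sleep-apnea", "snoring"])]

-- _normalized(items) = {s.strip().lower() for s in (items or []) if isinstance(s, str)}
def pvNormalizedB (items : List String) : PySem.Set String :=
  items.foldl (fun s item => PySem.Set.add s (PySem.Str.lower (PySem.Str.strip item))) PySem.Set.empty

def normalize_to_canonical_services_py_alt (high_ticket : List String) (missing : List String) : List String × List String :=
  let ht := pvNormalizedB high_ticket
  let ms := pvNormalizedB missing
  (pvRenderTable.filterMap (fun p => if PySem.Set.isdisjoint ht p.2 then none else some p.1),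
   pvRenderTable.filterMap (fun p => if PySem.Set.isdisjoint ms p.2 then none else some p.1))

-- ===== PRECONDITION & SPEC =====
def Spec_normalize_to_canonical_services_py (high_ticket : List String) (missing : List String) (out : List String × List String) : Prop := out = normalize_to_canonical_services_py_alt high_ticket missing
instance (high_ticket : List String) (missing : List String) (out : List String × List String) : Decidable (Spec_normalize_to_canonical_services_py high_ticket missing out) := by unfold Spec_normalize_to_canonical_services_py; infer_instance

-- ===== CLAIM =====
def Claim_equal_normalize_to_canonical_services_py : Prop := ∀ (high_ticket : List String) (missing : List String), Dom_normalize_to_canonical_services_py high_ticket missing → Spec_normalize_to_canonical_services_py high_ticket missing (normalize_to_canonical_services_py high_ticket missing)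

-- ===== LEMMAS AND PROOFS =====

-- matchLoop can only return a key of the table
lemma pvMatchLoop_key_mem (r : String) (bs : List (String × List String)) (k : String)
    (h : pvMatchLoopA r bs = some k) : k ∈ bs.map Prod.fst := by
  induction bs with
  | nil => simp [pvMatchLoopA] at h
  | cons p rest ih =>
    obtain ⟨k', as'⟩ := p
    simp only [pvMatchLoopA] at h
    by_cases hc : (as'.contains r || as'.any (fun a => r == a)) = true
    · rw [if_pos hc] at h
      injection h with h
      simp [h]
    · rw [if_neg hc] at h
      simp [ih h]

-- first-match for a table with distinct keys and globally distinct aliases IS membership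
lemma pvMatchLoop_some_iff (bs : List (String × List String))
    (hkeys : (bs.map Prod.fst).Nodup) (halias : (bs.flatMap Prod.snd).Nodup)
    (k : String) (as : List String) (hmem : (k, as) ∈ bs) (r : String) :
    pvMatchLoopA r bs = some k ↔ r ∈ as := by
  induction bs with
  | nil => simp at hmem
  | cons p rest ih =>
    obtain ⟨k', as'⟩ := p
    have hc' : (as'.contains r || as'.any (fun a => r == a)) = decide (r ∈ as') := by
      by_cases h : r ∈ as'
      · simp [h]
      · simp only [h, decide_false]
        simp only [Bool.or_eq_false_iff]
        refine ⟨by simpa using h, ?_⟩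
        simp only [List.any_eq_false, beq_iff_eq]
        exact fun x hx hrx => h (hrx ▸ hx)
    simp only [pvMatchLoopA]
    rw [hc']
    simp only [List.map_cons, List.nodup_cons] at hkeys
    simp only [List.flatMap_cons, List.nodup_append] at halias
    rcases List.mem_cons.mp hmem with heq | hrest
    · rw [Prod.mk.injEq] at heq
      obtain ⟨hk, ha⟩ := heq
      subst hk; subst ha
      by_cases hr : r ∈ as
      · simp [hr]
      · simp only [hr, decide_false, Bool.false_eq_true, if_false, iff_false]
        intro hsome
        exact hkeys.1 (pvMatchLoop_key_mem r rest _ hsome)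
    · by_cases hr : r ∈ as'
      · -- r matched the head bucket; the head key cannot be k, and r cannot be in as
        simp only [hr, decide_true, if_true]
        constructor
        · intro h
          injection h with h
          subst h
          exact absurd (List.mem_map.mpr ⟨_, hrest, rfl⟩) hkeys.1
        · intro hras
          have hmem2 : r ∈ rest.flatMap Prod.snd := List.mem_flatMap.mpr ⟨(k, as), hrest, hras⟩
          exact absurd rfl (halias.2.2 r hr r hmem2)
      · simp only [hr, decide_false, Bool.false_eq_true, if_false]
        exact ih hkeys.2 halias.2.1 hrest

set_option maxRecDepth 8000 in
lemma pvKeysNodup : (pvCanonicalBuckets.map Prod.fst).Nodup := by decide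

set_option maxRecDepth 8000 in
lemma pvAliasNodup : (pvCanonicalBuckets.flatMap Prod.snd).Nodup := by decide

-- membership in A's accumulated set
lemma pvCollectA_mem_aux (items : List String) (s : PySem.Set String) (k : String) :
    (k ∈ items.foldl
      (fun s item => (pvMatchBucketA item).elim s (fun b => if b == "" then s else PySem.Set.add s b)) s)
    ↔ k ∈ s ∨ ∃ it ∈ items, pvMatchBucketA it = some k ∧ k ≠ "" := by
  induction items generalizing s with
  | nil => simp
  | cons it rest ih =>
    rw [List.foldl_cons, ih]
    have hexp : (∃ x ∈ it :: rest, pvMatchBucketA x = some k ∧ k ≠ "")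
        ↔ ((pvMatchBucketA it = some k ∧ k ≠ "") ∨ ∃ x ∈ rest, pvMatchBucketA x = some k ∧ k ≠ "") := by
      constructor
      · rintro ⟨x, hx, hp⟩
        rcases List.mem_cons.mp hx with rfl | hx
        · exact Or.inl hp
        · exact Or.inr ⟨x, hx, hp⟩
      · rintro (hp | ⟨x, hx, hp⟩)
        · exact ⟨it, List.mem_cons_self .., hp⟩
        · exact ⟨x, List.mem_cons_of_mem _ hx, hp⟩
    rw [hexp]
    generalize hm : pvMatchBucketA it = o
    cases o with
    | none => simp
    | some b =>
      rcases eq_or_ne b "" with rfl | hb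
      · have hno : ¬(some ("" : String) = some k ∧ k ≠ "") :=
          fun hpair => hpair.2 (Option.some.inj hpair.1).symm
        simp only [Option.elim]
        rw [if_pos (by decide : (("" : String) == "") = true)]
        constructor
        · rintro (h1 | e)
          · exact Or.inl h1
          · exact Or.inr (Or.inr e)
        · rintro (h1 | (hpair | e))
          · exact Or.inl h1
          · exact absurd hpair hno
          · exact Or.inr e
      · simp only [Option.elim]
        rw [if_neg (by simpa using hb), PySem.Set.mem_add]
        constructor
        · rintro ((h1 | rfl) | e)
          · exact Or.inl h1
          · exact Or.inr (Or.inl ⟨rfl, hb⟩)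
          · exact Or.inr (Or.inr e)
        · rintro (h1 | (⟨heq, hkk⟩ | e))
          · exact Or.inl (Or.inl h1)
          · exact Or.inl (Or.inr (Option.some.inj heq).symm)
          · exact Or.inr e
-- the one condition equality, per table row
lemma pvCond_eq (items : List String) (k : String) (as : List String) (d : String)
    (hmem : (k, as) ∈ pvCanonicalBuckets) (hk : k ≠ "")
    (hd : pvDisplayMap.get? k = some d) :
    (if PySem.Set.contains (pvCollectA items) k then pvDisplayMap.get? k else none)
      = (if PySem.Set.isdisjoint (pvNormalizedB items) as then none else some d) := by
  have hmatch : ∀ it : String, pvMatchBucketA it = some k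
      ↔ PySem.Str.lower (PySem.Str.strip it) ∈ as := by
    intro it
    unfold pvMatchBucketA
    have hid : (if it == "" then "" else it) = it := by
      by_cases h : it == "" <;> simp_all
    rw [hid]
    exact pvMatchLoop_some_iff pvCanonicalBuckets pvKeysNodup pvAliasNodup k as hmem _
  have hA : PySem.Set.contains (pvCollectA items) k = true
      ↔ ∃ it ∈ items, PySem.Str.lower (PySem.Str.strip it) ∈ as := by
    rw [PySem.Set.contains_iff]
    unfold pvCollectA
    rw [pvCollectA_mem_aux]
    simp only [PySem.Set.empty, List.not_mem_nil, false_or]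
    constructor
    · rintro ⟨it, hit, hm, _⟩; exact ⟨it, hit, (hmatch it).mp hm⟩
    · rintro ⟨it, hit, hm⟩; exact ⟨it, hit, (hmatch it).mpr hm, hk⟩
  have hB : PySem.Set.isdisjoint (pvNormalizedB items) as = false
      ↔ ∃ it ∈ items, PySem.Str.lower (PySem.Str.strip it) ∈ as := by
    rw [← Bool.not_eq_true, not_iff_comm, PySem.Set.isdisjoint_iff]
    unfold pvNormalizedB
    constructor
    · intro h x hx
      rw [PySem.Set.mem_foldl_add] at hx
      rcases hx with hx | ⟨it, hit, rfl⟩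
      · simp [PySem.Set.empty] at hx
      · exact fun hxas => h ⟨it, hit, hxas⟩
    · intro h hex
      obtain ⟨it, hit, hm⟩ := hex
      have hmem2 : PySem.Str.lower (PySem.Str.strip it)
          ∈ items.foldl (fun s item => PySem.Set.add s (PySem.Str.lower (PySem.Str.strip item))) PySem.Set.empty := by
        rw [PySem.Set.mem_foldl_add]
        exact Or.inr ⟨it, hit, rfl⟩
      exact h _ hmem2 hm
  by_cases h : ∃ it ∈ items, PySem.Str.lower (PySem.Str.strip it) ∈ as
  · rw [if_pos (hA.mpr h), if_neg (by simp [hB.mpr h]), hd]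
  · rw [if_neg (fun hc => h (hA.mp hc)),
        if_pos (by rcases Bool.eq_false_or_eq_true (PySem.Set.isdisjoint (pvNormalizedB items) as) with ht | hf
                   · exact ht
                   · exact absurd (hB.mp hf) h)]

lemma pvComponent_eq (items : List String) :
    pvOrderKeys.filterMap (fun k => if PySem.Set.contains (pvCollectA items) k then pvDisplayMap.get? k else none)
      = pvRenderTable.filterMap (fun p => if PySem.Set.isdisjoint (pvNormalizedB items) p.2 then none else some p.1) := by
  simp only [pvOrderKeys, pvRenderTable, List.filterMap_cons, List.filterMap_nil]
  rw [pvCond_eq items "implants" ["implant", "dental implant", "implants", "dental implants", "all-on-4", "all on 4"] "Implants" (by decide) (by decide) (by decide),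
      pvCond_eq items "orthodontics" ["orthodontic", "orthodontics", "invisalign", "braces", "clear aligner", "clear aligners"] "Orthodontics" (by decide) (by decide) (by decide),
      pvCond_eq items "veneers" ["veneer", "veneers", "porcelain veneer", "porcelain veneers"] "Veneers" (by decide) (by decide) (by decide),
      pvCond_eq items "emergency" ["emergency", "emergency dental", "emergency dentist", "same day", "same-day", "urgent dental"] "Emergency" (by decide) (by decide) (by decide),
      pvCond_eq items "cosmetic" ["cosmetic", "cosmetic dentistry", "smile makeover", "teeth whitening", "whitening"] "Cosmetic" (by decide) (by decide) (by decide),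
      pvCond_eq items "sedation" ["sedation", "sedation dentistry", "iv sedation", "nitrous", "nitrous oxide", "oral sedation", "sleep dentistry"] "Sedation" (by decide) (by decide) (by decide),
      pvCond_eq items "crowns" ["crown", "crowns", "same day crown", "same-day crown", "dental crown", "dental crowns"] "Crowns" (by decide) (by decide) (by decide),
      pvCond_eq items "sleep apnea" ["sleep apnea", "sleep-apnea", "snoring"] "Sleep Apnea" (by decide) (by decide) (by decide)]

-- ===== VERDICT =====
theorem normalize_to_canonical_services_py_spec : Claim_equal_normalize_to_canonical_services_py := by
  intro h m _
  unfold Spec_normalize_to_canonical_services_py normalize_to_canonical_services_py normalize_to_canonical_services_py_alt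
  simp only [pvComponent_eq]
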